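-- pv_equiv track=rewrite | github.com/marcelocantos/flac | cmd/hy/pinyin.py | accent
-- ===== SOURCE A (Python) =====
-- pinyinColors = {
--     1: 31,
--     2: 32,
--     3: 34,
--     4: 35,
--     5: 30,
-- }
--
-- def pinyinColor(pinyin, tone):
--     return '\033[1;%dm%s\033[0m' % (pinyinColors[tone], pinyin)
--
-- vowels = {
--     'a': ' āáǎàa',
--     'e': ' ēéěèe',
--     'i': ' īíǐìi',
--     'o': ' ōóǒòo',
--     'u': ' ūúǔùu',
--     'ü': ' ǖǘǚǜü',
-- }
--
-- def accent(pinyin, tone):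
--     tone = int(tone)
--     chars = list(pinyin)
--     v = sum(c in vowels for c in chars)
--     # https://en.wikipedia.org/wiki/Pinyin#Rules_for_placing_the_tone_mark
--     if v == 1:
--         for i, c in enumerate(chars):
--             if c in vowels:
--                 chars[i] = vowels[c][tone]
--                 break
--     elif 'a' in pinyin or 'e' in pinyin:
--         for i, c in enumerate(chars):
--             if c in 'ae':
--                 chars[i] = vowels[c][tone]
--                 break
--     elif 'ou' in pinyin:
--         for i, c in enumerate(chars):
--             if c == 'o':
--                 chars[i] = vowels[c][tone]
--                 break
--     else:
--         for i in range(len(chars) - 1, -1, -1):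
--             c = chars[i]
--             if c in vowels:
--                 chars[i] = vowels[c][tone]
--                 break
--     return pinyinColor(''.join(chars), tone)
-- ===== SOURCE B (Python) =====
-- pinyinColors = {
--     1: 31,
--     2: 32,
--     3: 34,
--     4: 35,
--     5: 30,
-- }
--
-- def pinyinColor(pinyin, tone):
--     return '\033[1;%dm%s\033[0m' % (pinyinColors[tone], pinyin)
--
-- vowels = {
--     'a': ' āáǎàa',
--     'e': ' ēéěèe',
--     'i': ' īíǐìi',
--     'o': ' ōóǒòo',
--     'u': ' ūúǔùu',
--     'ü': ' ǖǘǚǜü',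
-- }
--
-- def accent(pinyin, tone):
--     tone = int(tone)
--     def mark_first(s, targets):
--         # rebuild the string recursively, marking the first char found in targets
--         if not s:
--             return ''
--         if s[0] in targets:
--             return vowels[s[0]][tone] + s[1:]
--         return s[0] + mark_first(s[1:], targets)
--     if 'a' in pinyin or 'e' in pinyin:
--         body = mark_first(pinyin, 'ae')
--     elif 'ou' in pinyin:
--         body = mark_first(pinyin, 'o')
--     else:
--         body = mark_first(pinyin[::-1], vowels)[::-1]
--     return pinyinColor(body, tone)
-- ===== Notes on version B (the rewrite author's own statement) =====
-- stated objective: simpler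
-- what changed: B never computes an index or mutates a char list: one recursive helper rebuilds the string marking the first char in a target set, the last-vowel rule is obtained by reversing the string, marking its first vowel and reversing back, and A's vowel count with its redundant v==1 branch disappears.
import Mathlib
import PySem

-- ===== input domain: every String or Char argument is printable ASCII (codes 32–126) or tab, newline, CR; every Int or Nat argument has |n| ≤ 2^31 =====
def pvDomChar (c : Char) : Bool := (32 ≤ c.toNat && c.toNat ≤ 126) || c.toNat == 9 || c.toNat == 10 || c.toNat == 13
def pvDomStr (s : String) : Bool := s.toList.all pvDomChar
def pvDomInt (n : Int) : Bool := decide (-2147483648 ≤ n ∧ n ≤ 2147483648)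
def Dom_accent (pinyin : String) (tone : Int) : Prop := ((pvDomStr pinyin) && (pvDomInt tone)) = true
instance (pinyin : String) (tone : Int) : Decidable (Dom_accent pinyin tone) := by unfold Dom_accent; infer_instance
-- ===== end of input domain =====

-- B rebuilds the string with one recursive mark-first helper (last vowel = reverse, mark first, reverse back),
-- replacing A's vowel count, index loops and in-place mutation (objective: simpler).

-- ===== PORT A =====
-- shared module context: the `vowels` dict, `pinyinColors` and the helper `pinyinColor` (both Pythons use them verbatim)
def pvVowels : List (Char × List Char) :=
  [('a', [' ', 'ā', 'á', 'ǎ', 'à', 'a']),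
   ('e', [' ', 'ē', 'é', 'ě', 'è', 'e']),
   ('i', [' ', 'ī', 'í', 'ǐ', 'ì', 'i']),
   ('o', [' ', 'ō', 'ó', 'ǒ', 'ò', 'o']),
   ('u', [' ', 'ū', 'ú', 'ǔ', 'ù', 'u']),
   ('ü', [' ', 'ǖ', 'ǘ', 'ǚ', 'ǜ', 'ü'])]

-- `c in vowels`
def pvIsVowel (c : Char) : Bool := (pvVowels.lookup c).isSome

-- `vowels[c][tone]` (the getD defaults are unreachable: c is a vowel key and 1 ≤ tone ≤ 5 under Pre_)
def pvMark (c : Char) (tone : Int) : Char :=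
  (PySem.List.pyGet? ((pvVowels.lookup c).getD []) tone).getD c

def pvColors : List (Int × Int) := [(1, 31), (2, 32), (3, 34), (4, 35), (5, 30)]

-- `'\033[1;%dm%s\033[0m' % (pinyinColors[tone], pinyin)` (lookup default unreachable under Pre_)
def pvPinyinColor (s : String) (tone : Int) : String :=
  "\x1b[1;" ++ PySem.Int.toStr ((pvColors.lookup tone).getD 0) ++ "m" ++ s ++ "\x1b[0m"

-- A's `for i, c in enumerate(chars): if p(c): chars[i] = vowels[c][tone]; break` — set in place at the found index
def pvFindSet (chars : List Char) (tone : Int) (p : Char → Bool) : List (Int × Char) → List Char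
  | [] => chars
  | (i, c) :: rest => if p c then PySem.List.pySetD chars i (pvMark c tone) else pvFindSet chars tone p rest

-- A's `for i in range(len(chars)-1, -1, -1): c = chars[i]; if c in vowels: chars[i] = vowels[c][tone]; break`
def pvBackGo (cs : List Char) (tone : Int) : List Int → List Char
  | [] => cs
  | i :: is =>
    let c := PySem.List.pyGetD cs i ' '
    if pvIsVowel c then PySem.List.pySetD cs i (pvMark c tone)
    else pvBackGo cs tone is

def accent (pinyin : String) (tone : Int) : String :=
  let chars := pinyin.toList
  let v : Int := (chars.map (fun c => if pvIsVowel c then (1 : Int) else 0)).sum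
  let chars' :=
    if v == 1 then pvFindSet chars tone pvIsVowel (PySem.List.enumerate chars)
    else if PySem.Str.isIn "a" pinyin || PySem.Str.isIn "e" pinyin then
      pvFindSet chars tone (fun c => c == 'a' || c == 'e') (PySem.List.enumerate chars)
    else if PySem.Str.isIn "ou" pinyin then
      pvFindSet chars tone (fun c => c == 'o') (PySem.List.enumerate chars)
    else
      pvBackGo chars tone (PySem.List.pyRange ((chars.length : Int) - 1) (-1) (-1))
  pvPinyinColor (String.ofList chars') tone

-- ===== PORT B =====
-- B's recursive `mark_first`: rebuild the string, marking the first char in `targets`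
def pvMarkFirst (tone : Int) (p : Char → Bool) : List Char → List Char
  | [] => []
  | c :: cs => if p c then pvMark c tone :: cs else c :: pvMarkFirst tone p cs

def accent_alt (pinyin : String) (tone : Int) : String :=
  let body :=
    if PySem.Str.isIn "a" pinyin || PySem.Str.isIn "e" pinyin then
      pvMarkFirst tone (fun c => c == 'a' || c == 'e') pinyin.toList
    else if PySem.Str.isIn "ou" pinyin then
      pvMarkFirst tone (fun c => c == 'o') pinyin.toList
    else
      -- mark_first(pinyin[::-1], vowels)[::-1]
      (pvMarkFirst tone pvIsVowel pinyin.toList.reverse).reverse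
  pvPinyinColor (String.ofList body) tone

-- ===== PRECONDITION & SPEC =====
-- Pre_: the Python A raises KeyError on pinyinColors[tone] unless tone ∈ {1,…,5}
def Pre_accent (_pinyin : String) (tone : Int) : Prop := 1 ≤ tone ∧ tone ≤ 5
instance (pinyin : String) (tone : Int) : Decidable (Pre_accent pinyin tone) := by unfold Pre_accent; infer_instance
def pvWitness_accent : String × Int := ("hao", 3)

def Spec_accent (pinyin : String) (tone : Int) (out : String) : Prop := out = accent_alt pinyin tone
instance (pinyin : String) (tone : Int) (out : String) : Decidable (Spec_accent pinyin tone out) := by unfold Spec_accent; infer_instance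

-- ===== CLAIM (what is proved, stated in full; the proofs are below) =====
def Claim_equal_accent : Prop := ∀ (pinyin : String) (tone : Int), Dom_accent pinyin tone → Pre_accent pinyin tone → Spec_accent pinyin tone (accent pinyin tone)

-- ===== LEMMAS AND PROOFS =====

-- common target form of all four loops: set the mark at one optional index
def pvApplyMark (cs : List Char) (tone : Int) : Option Nat → List Char
  | none => cs
  | some i => cs.set i (pvMark (cs.getD i ' ') tone)

-- A's enumerate-and-set loop finds the first index and sets it once
theorem pvFindSet_enum (full cs : List Char) (tone : Int) (p : Char → Bool) (s : Nat) :
    pvFindSet full tone p (PySem.List.enumerate cs (s : Int)) =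
      match cs.findIdx? p with
      | none => full
      | some j => full.set (s + j) (pvMark (cs.getD j ' ') tone) := by
  induction cs generalizing s with
  | nil => simp [PySem.List.enumerate_nil, pvFindSet, List.findIdx?_nil]
  | cons c cs ih =>
    rw [PySem.List.enumerate_cons, pvFindSet, List.findIdx?_cons]
    by_cases h : p c = true
    · simp [h, PySem.List.pySetD_natCast, List.getD]
    · rw [if_neg h, if_neg h]
      have : ((s : Int) + 1) = ((s + 1 : Nat) : Int) := by push_cast; ring
      rw [this, ih (s + 1)]
      cases hf : cs.findIdx? p with
      | none => simp
      | some j =>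
        simp only [Option.map_some]
        have : s + 1 + j = s + (j + 1) := by omega
        rw [this]
        simp [List.getD]

theorem pvFindSet_eq (cs : List Char) (tone : Int) (p : Char → Bool) :
    pvFindSet cs tone p (PySem.List.enumerate cs) = pvApplyMark cs tone (cs.findIdx? p) := by
  have h := pvFindSet_enum cs cs tone p 0
  simp only [Nat.cast_zero, Nat.zero_add] at h
  rw [h]
  cases hf : cs.findIdx? p with
  | none => rfl
  | some j => simp [pvApplyMark]

-- B's recursive rebuild is the same set-at-first-index
theorem pvMarkFirst_eq (tone : Int) (p : Char → Bool) (cs : List Char) :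
    pvMarkFirst tone p cs = pvApplyMark cs tone (cs.findIdx? p) := by
  induction cs with
  | nil => rfl
  | cons c cs ih =>
    rw [pvMarkFirst, List.findIdx?_cons]
    by_cases h : p c = true
    · simp [h, pvApplyMark]
    · rw [if_neg h, if_neg h, ih]
      cases hf : cs.findIdx? p with
      | none => simp [pvApplyMark]
      | some i => simp [pvApplyMark]

-- setting in the reversed list, then reversing back
theorem set_reverse (cs : List Char) (j : Nat) (hj : j < cs.length) (x : Char) :
    (cs.reverse.set j x).reverse = cs.set (cs.length - 1 - j) x := by
  apply List.ext_getElem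
  · simp
  · intro k h1 h2
    have hk : k < cs.length := by simpa using h2
    rw [List.getElem_reverse]
    simp only [List.getElem_set, List.length_set, List.length_reverse, List.getElem_reverse]
    split_ifs with h h' h' <;> first | rfl | omega | (congr 1; omega)

-- B's reverse/mark/reverse branch as an applyMark on the original list
theorem rev_mark_eq (tone : Int) (p : Char → Bool) (cs : List Char) :
    (pvMarkFirst tone p cs.reverse).reverse =
      pvApplyMark cs tone ((cs.reverse.findIdx? p).map (fun j => cs.length - 1 - j)) := by
  rw [pvMarkFirst_eq]
  cases hf : cs.reverse.findIdx? p with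
  | none => simp [pvApplyMark]
  | some j =>
    have hj : j < cs.length := by
      have := (List.findIdx?_eq_some_iff_findIdx_eq.mp hf).1
      simpa using this
    simp only [pvApplyMark, Option.map_some]
    have hget : cs.reverse.getD j ' ' = cs.getD (cs.length - 1 - j) ' ' := by
      rw [List.getD_eq_getElem _ _ (by simpa using hj), List.getD_eq_getElem _ _ (by omega)]
      rw [List.getElem_reverse]
    rw [hget, set_reverse _ _ hj]

-- A's backward index loop over a list of (cast) indices: find the first hot index, set it once
theorem pvBackGo_map (cs : List Char) (tone : Int) (js : List Nat) :
    pvBackGo cs tone (js.map (fun (j : Nat) => ((j : Nat) : Int))) =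
      pvApplyMark cs tone (js.find? (fun i => pvIsVowel (cs.getD i ' '))) := by
  induction js with
  | nil => rfl
  | cons j js ih =>
    rw [List.map_cons, List.find?_cons, pvBackGo]
    cases h : pvIsVowel (cs.getD j ' ') with
    | true =>
      simp only [PySem.List.pyGetD_natCast, PySem.List.pySetD_natCast, h, if_pos]
      simp [pvApplyMark]
    | false =>
      simp only [PySem.List.pyGetD_natCast, h]
      simpa using ih

-- range(len(chars)-1, -1, -1) is the reversed index list
theorem pvRange_down (n : Nat) :
    PySem.List.pyRange ((n : Int) - 1) (-1) (-1) =
      ((List.range n).reverse).map (fun (j : Nat) => ((j : Nat) : Int)) := by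
  rw [PySem.List.pyRange_neg_one]
  have hn : ((n : Int) - 1 - (-1)).toNat = n := by omega
  rw [hn]
  apply List.ext_getElem
  · simp
  · intro k h1 h2
    have hk : k < n := by simpa using h1
    simp only [List.getElem_map, List.getElem_reverse, List.getElem_range, List.length_range]
    omega

theorem find?_congr' {α : Type} (p q : α → Bool) (l : List α)
    (h : ∀ x ∈ l, p x = q x) : l.find? p = l.find? q := by
  induction l with
  | nil => rfl
  | cons a l ih =>
    rw [List.find?_cons, List.find?_cons, h a (by simp)]
    cases q a
    · exact ih (fun x hx => h x (by simp [hx]))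
    · rfl

-- the backward scan over indices is the find-on-the-reversed-list
theorem find?_range_reverse (cs : List Char) (p : Char → Bool) :
    ((List.range cs.length).reverse).find? (fun i => p (cs.getD i ' ')) =
      (cs.reverse.findIdx? p).map (fun j => cs.length - 1 - j) := by
  induction cs using List.reverseRecOn with
  | nil => rfl
  | append_singleton ds c ih =>
    have hlen : (ds ++ [c]).length = ds.length + 1 := by simp
    rw [hlen, List.range_succ, List.reverse_append, List.reverse_singleton]
    simp only [List.singleton_append, List.find?_cons]
    have hget : (ds ++ [c]).getD ds.length ' ' = c := by
      simp [List.getD]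
    rw [hget]
    by_cases h : p c = true
    · rw [h]
      have h0 : (ds ++ [c]).reverse.findIdx? p = some 0 := by
        simp [List.reverse_append, List.findIdx?_cons, h]
      rw [h0]
      simp
    · simp only [h]
      have hcong : ((List.range ds.length).reverse).find? (fun i => p ((ds ++ [c]).getD i ' ')) =
          ((List.range ds.length).reverse).find? (fun i => p (ds.getD i ' ')) := by
        apply find?_congr'
        intro i hi
        have hi' : i < ds.length := by simpa using hi
        have hgd : (ds ++ [c]).getD i ' ' = ds.getD i ' ' := by
          simp [List.getD, List.getElem?_append_left hi']
        rw [hgd]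
      rw [hcong, ih]
      have hrev : (ds ++ [c]).reverse.findIdx? p =
          (ds.reverse.findIdx? p).map (fun j => j + 1) := by
        simp [List.reverse_append, List.findIdx?_cons, h]
      rw [hrev, Option.map_map]
      cases hf : ds.reverse.findIdx? p with
      | none => simp
      | some j =>
        simp only [Option.map_some, Function.comp]
        congr 1
        omega

theorem ae_isVowel (c : Char) (h : (c == 'a' || c == 'e') = true) : pvIsVowel c = true := by
  rcases Bool.or_eq_true_iff.mp h with h' | h' <;>
    · rw [show c = _ from eq_of_beq h']; decide

-- with exactly one vowel and an 'a'/'e' present, the first vowel IS the first 'a'/'e'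
theorem findIdx?_vowel_eq_ae (cs : List Char)
    (h1 : cs.countP pvIsVowel = 1)
    (h2 : cs.any (fun c => c == 'a' || c == 'e') = true) :
    cs.findIdx? pvIsVowel = cs.findIdx? (fun c => c == 'a' || c == 'e') := by
  induction cs with
  | nil => simp at h2
  | cons c cs ih =>
    rw [List.findIdx?_cons, List.findIdx?_cons]
    by_cases hae : (c == 'a' || c == 'e') = true
    · rw [if_pos hae, if_pos (ae_isVowel c hae)]
    · rw [if_neg hae]
      have hb : (c == 'a' || c == 'e') = false := by
        cases hb : (c == 'a' || c == 'e') with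
        | true => exact absurd hb hae
        | false => rfl
      have h2' : cs.any (fun c => c == 'a' || c == 'e') = true := by
        simp only [List.any_cons, hb, Bool.false_or] at h2; exact h2
      by_cases hv : pvIsVowel c = true
      · exfalso
        have h0 : cs.countP pvIsVowel = 0 := by
          rw [List.countP_cons, if_pos hv] at h1; omega
        have hnov := List.countP_eq_zero.mp h0
        obtain ⟨x, hx, hxae⟩ := List.any_eq_true.mp h2'
        exact absurd (ae_isVowel x hxae) (by simpa using hnov x hx)
      · rw [if_neg hv]
        have h1' : cs.countP pvIsVowel = 1 := by
          rw [List.countP_cons, if_neg hv] at h1; omega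
        rw [ih h1' h2']

-- with exactly one vowel, the first vowel is the last vowel
theorem findIdx?_unique_rev (cs : List Char) (p : Char → Bool)
    (h1 : cs.countP p = 1) :
    cs.findIdx? p = (cs.reverse.findIdx? p).map (fun j => cs.length - 1 - j) := by
  induction cs with
  | nil => simp at h1
  | cons c cs ih =>
    rw [List.findIdx?_cons, List.reverse_cons, List.findIdx?_append]
    by_cases h : p c = true
    · rw [if_pos h]
      have h0 : cs.countP p = 0 := by rw [List.countP_cons, if_pos h] at h1; omega
      have hnone : cs.reverse.findIdx? p = none := by
        rw [List.findIdx?_eq_none_iff]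
        intro x hx
        simpa using List.countP_eq_zero.mp h0 x (List.mem_reverse.mp hx)
      rw [hnone]
      simp [List.findIdx?_cons, h]
    · rw [if_neg h]
      have h1' : cs.countP p = 1 := by rw [List.countP_cons, if_neg h] at h1; omega
      have hpos : ∃ x ∈ cs, p x = true := by
        have hfil : (List.filter p cs).length = 1 := by
          rw [← List.countP_eq_length_filter]; exact h1'
        obtain ⟨x, hx⟩ := List.length_eq_one_iff.mp hfil
        exact ⟨x, List.mem_of_mem_filter (hx ▸ List.mem_singleton_self x),
          List.of_mem_filter (hx ▸ List.mem_singleton_self x)⟩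
      have hsome : (cs.reverse.findIdx? p).isSome = true := by
        rw [List.findIdx?_isSome, List.any_eq_true]
        obtain ⟨x, hx, hpx⟩ := hpos
        exact ⟨x, List.mem_reverse.mpr hx, hpx⟩
      obtain ⟨j, hj⟩ := Option.isSome_iff_exists.mp hsome
      have hjlt : j < cs.length := by
        simpa using (List.findIdx?_eq_some_iff_findIdx_eq.mp hj).1
      rw [ih h1', hj]
      simp only [Option.some_or, Option.map_some, List.length_cons]
      congr 1
      omega

-- "ou" a substring forces at least two vowels
theorem ou_two_vowels (cs : List Char) (h : ['o', 'u'] <:+: cs) :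
    2 ≤ cs.countP pvIsVowel := by
  obtain ⟨s, t, rfl⟩ := h
  simp only [List.countP_append, List.countP_cons, List.countP_nil,
    show pvIsVowel 'o' = true from by decide, show pvIsVowel 'u' = true from by decide]
  simp
  omega

-- A's membership test `'a' in pinyin or 'e' in pinyin` matches B's 'ae' predicate
theorem isIn_ae_iff (pinyin : String) :
    (PySem.Str.isIn "a" pinyin || PySem.Str.isIn "e" pinyin) = true ↔
      pinyin.toList.any (fun c => c == 'a' || c == 'e') = true := by
  constructor
  · intro h
    rcases Bool.or_eq_true_iff.mp h with h' | h' <;>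
    · have hm := List.singleton_infix_iff _ _ |>.mp
        (by simpa using (PySem.Str.isIn_iff_infix _ _).mp h')
      exact List.any_eq_true.mpr ⟨_, hm, by simp⟩
  · intro h
    obtain ⟨x, hx, hae⟩ := List.any_eq_true.mp h
    rcases Bool.or_eq_true_iff.mp hae with h' | h' <;> rw [show x = _ from eq_of_beq h'] at hx
    · exact Bool.or_eq_true_iff.mpr (Or.inl ((PySem.Str.isIn_iff_infix _ _).mpr
        (by simpa using (List.singleton_infix_iff _ _).mpr hx)))
    · exact Bool.or_eq_true_iff.mpr (Or.inr ((PySem.Str.isIn_iff_infix _ _).mpr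
        (by simpa using (List.singleton_infix_iff _ _).mpr hx)))

theorem accent_eq (pinyin : String) (tone : Int) :
    accent pinyin tone = accent_alt pinyin tone := by
  unfold accent accent_alt
  simp only [PySem.List.sum_map_ite_one_zero]
  congr 1
  congr 1
  set cs := pinyin.toList with hcs
  have hback : pvBackGo cs tone (PySem.List.pyRange ((cs.length : Int) - 1) (-1) (-1)) =
      pvApplyMark cs tone ((cs.reverse.findIdx? pvIsVowel).map (fun j => cs.length - 1 - j)) := by
    rw [pvRange_down, pvBackGo_map, find?_range_reverse]
  by_cases hAE : (PySem.Str.isIn "a" pinyin || PySem.Str.isIn "e" pinyin) = true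
  · have hany : cs.any (fun c => c == 'a' || c == 'e') = true := (isIn_ae_iff pinyin).mp hAE
    rw [if_pos hAE, if_pos hAE]
    by_cases hv : ((cs.countP pvIsVowel : Int) == 1) = true
    · have hv1 : cs.countP pvIsVowel = 1 := by
        have := beq_iff_eq.mp hv; exact_mod_cast this
      rw [if_pos hv, pvFindSet_eq, pvMarkFirst_eq, findIdx?_vowel_eq_ae cs hv1 hany]
    · rw [if_neg hv, pvFindSet_eq, pvMarkFirst_eq]
  · rw [if_neg hAE, if_neg hAE]
    by_cases hOU : PySem.Str.isIn "ou" pinyin = true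
    · have h2 : 2 ≤ cs.countP pvIsVowel :=
        ou_two_vowels cs (by simpa using (PySem.Str.isIn_iff_infix _ _).mp hOU)
      have hv : ¬ ((cs.countP pvIsVowel : Int) == 1) = true := by
        simp only [beq_iff_eq]
        intro h
        have : cs.countP pvIsVowel = 1 := by exact_mod_cast h
        omega
      rw [if_neg hv, if_pos hOU, if_pos hOU, pvFindSet_eq, pvMarkFirst_eq]
    · rw [if_neg hOU, if_neg hOU]
      by_cases hv : ((cs.countP pvIsVowel : Int) == 1) = true
      · have hv1 : cs.countP pvIsVowel = 1 := by
          have := beq_iff_eq.mp hv; exact_mod_cast this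
        rw [if_pos hv, pvFindSet_eq, rev_mark_eq, findIdx?_unique_rev cs pvIsVowel hv1]
      · rw [if_neg hv, hback, rev_mark_eq]

-- ===== VERDICT (by name: the statement is the Claim_ definition above) =====
theorem accent_spec : Claim_equal_accent := by
  intro pinyin tone _ _
  unfold Spec_accent
  exact accent_eq pinyin tone
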